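-- pv_equiv track=rewrite | github.com/2021145152/IRMV | pddl/scripts_origin/pddl_writer.py | generate_init_artifact_locations
-- ===== SOURCE A (Python) =====
-- from typing import Dict, List, Any
--
-- def generate_init_artifact_locations(artifact_locs: Dict[str, Dict[str, str]]) -> List[str]:
--     """
--     Generate artifact location section of init.
--
--     Args:
--         artifact_locs: Dict mapping artifact_id to location info
--
--     Returns:
--         List of PDDL init statements
--     """
--     lines = []
--
--     lines.append("    ; ====================================================================")
--     lines.append("    ; ARTIFACT LOCATIONS")
--     lines.append("    ; ====================================================================")
--
--     for artifact_id in sorted(artifact_locs.keys()):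
--         loc_info = artifact_locs[artifact_id]
--
--         # Record all location relationships
--         for rel_type, target_id in sorted(loc_info.items()):
--             lines.append(f"    ({rel_type} {artifact_id} {target_id})")
--
--     return lines
-- ===== SOURCE B (Python) =====
-- from typing import Dict, List
--
--
-- def generate_init_artifact_locations(artifact_locs: Dict[str, Dict[str, str]]) -> List[str]:
--     """Gather all (artifact_id, rel_type, target_id) triples, sort once, then format."""
--     header = [
--         "    ; ====================================================================",
--         "    ; ARTIFACT LOCATIONS",
--         "    ; ====================================================================",
--     ]
--     triples = [
--         (artifact_id, rel_type, target_id)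
--         for artifact_id, loc_info in artifact_locs.items()
--         for rel_type, target_id in loc_info.items()
--     ]
--     triples.sort()
--     return header + [f"    ({rel_type} {artifact_id} {target_id})"
--                      for artifact_id, rel_type, target_id in triples]
-- ===== Notes on version B (the rewrite author's own statement) =====
-- stated objective: alternative
-- what changed: Instead of A's nested traversal (sort the outer keys, then for each artifact sort its inner items and append), B gathers all (artifact_id, rel_type, target_id) triples in one unsorted pass and performs a single global sort on (artifact_id, rel_type), then formats the header plus one line per sorted triple.
import Mathlib
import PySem

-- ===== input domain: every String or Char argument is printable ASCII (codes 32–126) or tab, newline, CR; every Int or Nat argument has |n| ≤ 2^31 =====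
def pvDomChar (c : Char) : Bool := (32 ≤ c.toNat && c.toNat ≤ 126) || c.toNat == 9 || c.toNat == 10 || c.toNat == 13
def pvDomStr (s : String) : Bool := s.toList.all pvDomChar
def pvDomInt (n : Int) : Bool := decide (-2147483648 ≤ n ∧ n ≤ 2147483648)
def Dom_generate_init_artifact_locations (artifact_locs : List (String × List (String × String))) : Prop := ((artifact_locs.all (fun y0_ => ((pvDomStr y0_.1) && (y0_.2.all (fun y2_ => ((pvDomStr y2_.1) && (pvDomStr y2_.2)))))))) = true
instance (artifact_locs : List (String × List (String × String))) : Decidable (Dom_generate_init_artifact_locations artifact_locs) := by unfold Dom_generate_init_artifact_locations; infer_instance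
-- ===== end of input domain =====

-- B gathers all (artifact, rel, target) triples in one unsorted pass and sorts them once on
-- (artifact, rel), replacing A's nested sort-the-keys / sort-each-inner-dict traversal.

-- the f-string "    ({rel_type} {artifact_id} {target_id})", identical in both Pythons
def pvLine (rel_type artifact_id target_id : String) : String :=
  "    (" ++ rel_type ++ " " ++ artifact_id ++ " " ++ target_id ++ ")"

-- ===== PORT A =====
def generate_init_artifact_locations (artifact_locs : List (String × List (String × String))) : List String :=
  -- lines = []; three appends of the header lines
  let lines : List String := ([] : List String)
      ++ ["    ; ===================================================================="]
      ++ ["    ; ARTIFACT LOCATIONS"]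
      ++ ["    ; ===================================================================="]
  -- for artifact_id in sorted(artifact_locs.keys()):
  (PySem.List.sorted ((PySem.Dict.mk artifact_locs).keys) (fun k => k) false).foldl
    (fun lines artifact_id =>
      -- loc_info = artifact_locs[artifact_id]   (the key comes from keys(), so it is present)
      let loc_info := (PySem.Dict.mk artifact_locs).getD artifact_id []
      -- for rel_type, target_id in sorted(loc_info.items()): lines.append(f"…")
      (PySem.List.sorted2 loc_info (fun p => p.1) (fun p => p.2) false).foldl
        (fun lines p => lines ++ [pvLine p.1 artifact_id p.2]) lines)
    lines

-- ===== PORT B =====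
def generate_init_artifact_locations_alt (artifact_locs : List (String × List (String × String))) : List String :=
  let header : List String :=
    ["    ; ====================================================================",
     "    ; ARTIFACT LOCATIONS",
     "    ; ===================================================================="]
  -- triples = [(a, r, t) for a, loc_info in items for r, t in loc_info.items()]
  let triples : List (String × String × String) :=
    artifact_locs.flatMap (fun p => p.2.map (fun q => (p.1, q.1, q.2)))
  -- triples.sort()  — Python tuple comparison is nested lexicographic order
  let sortedTriples := PySem.List.sorted triples (fun tr => toLex (tr.1, toLex tr.2)) false
  header ++ sortedTriples.map (fun tr => pvLine tr.2.1 tr.1 tr.2.2)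

-- ===== PRECONDITION & SPEC =====
-- Pre_ excludes association lists with a duplicate outer artifact_id or a duplicate inner
-- rel_type: such lists do not arise from a Python dict of dicts (duplicates collapse on dict
-- construction), so behaviour on them is an artefact of the list representation.
def Pre_generate_init_artifact_locations (artifact_locs : List (String × List (String × String))) : Prop :=
  (artifact_locs.map (·.1)).Nodup ∧ ∀ p ∈ artifact_locs, (p.2.map (·.1)).Nodup
instance (artifact_locs : List (String × List (String × String))) : Decidable (Pre_generate_init_artifact_locations artifact_locs) := by unfold Pre_generate_init_artifact_locations; infer_instance

def pvWitness_generate_init_artifact_locations : (List (String × List (String × String))) :=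
  [("a2", [("at", "loc2")]), ("a1", [("in", "box"), ("at", "loc1")])]

def Spec_generate_init_artifact_locations (artifact_locs : List (String × List (String × String))) (out : List String) : Prop := out = generate_init_artifact_locations_alt artifact_locs
instance (artifact_locs : List (String × List (String × String))) (out : List String) : Decidable (Spec_generate_init_artifact_locations artifact_locs out) := by unfold Spec_generate_init_artifact_locations; infer_instance

-- ===== CLAIM (what is proved, stated in full; the proofs are below) =====
def Claim_equal_generate_init_artifact_locations : Prop := ∀ (artifact_locs : List (String × List (String × String))), Dom_generate_init_artifact_locations artifact_locs → Pre_generate_init_artifact_locations artifact_locs → Spec_generate_init_artifact_locations artifact_locs (generate_init_artifact_locations artifact_locs)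

-- ===== LEMMAS AND PROOFS =====

-- Pairwise over a flatMap, from pairwise inside each block and pairwise across blocks
theorem pv_pairwise_flatMap {α β : Type} {R : β → β → Prop} (l : List α) (f : α → List β)
    (hin : ∀ x ∈ l, (f x).Pairwise R)
    (hcross : l.Pairwise (fun x y => ∀ u ∈ f x, ∀ v ∈ f y, R u v)) :
    (l.flatMap f).Pairwise R := by
  induction l with
  | nil => simp
  | cons x xs ih =>
    rw [List.flatMap_cons, List.pairwise_append]
    refine ⟨hin x (by simp), ih (fun y hy => hin y (by simp [hy]))
      (List.Pairwise.sublist (by simp) hcross), ?_⟩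
    intro u hu v hv
    rcases List.mem_flatMap.mp hv with ⟨y, hy, hvy⟩
    exact (List.rel_of_pairwise_cons hcross hy) u hu v hvy

-- sorted2 is sorted with the lexicographic pair key
theorem pv_sorted2_eq_sorted_lex {α κ₁ κ₂ : Type} [LinearOrder κ₁] [LinearOrder κ₂]
    (xs : List α) (k1 : α → κ₁) (k2 : α → κ₂) :
    PySem.List.sorted2 xs k1 k2 false = PySem.List.sorted xs (fun x => toLex (k1 x, k2 x)) false := by
  have hb : (fun u v => decide (k1 u < k1 v) || (!decide (k1 v < k1 u) && decide (k2 u < k2 v)))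
      = (fun u v : α => decide (toLex (k1 u, k2 u) < toLex (k1 v, k2 v))) := by
    funext u v
    by_cases h1 : k1 u < k1 v
    · simp [h1, Prod.Lex.toLex_lt_toLex]
    · by_cases h2 : k1 v < k1 u
      · simp [h1, h2, Prod.Lex.toLex_lt_toLex, ne_of_gt h2]
      · have he : k1 u = k1 v := le_antisymm (not_lt.mp h2) (not_lt.mp h1)
        simp [Prod.Lex.toLex_lt_toLex, he]
  simp only [PySem.List.sorted2, PySem.List.sorted, Bool.false_eq_true, ite_false]
  rw [hb]

theorem pv_main (al : List (String × List (String × String)))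
    (h1 : (al.map (·.1)).Nodup)
    (h2 : ∀ p ∈ al, (p.2.map (·.1)).Nodup) :
    generate_init_artifact_locations al = generate_init_artifact_locations_alt al := by
  have hknodup : (PySem.Dict.mk al).keys.Nodup := h1
  have hget : ∀ p ∈ al, (PySem.Dict.mk al).getD p.1 [] = p.2 := by
    intro p hp
    exact PySem.Dict.getD_of_mem_items _ (by simpa using hp) hknodup []
  set ks := PySem.List.sorted ((PySem.Dict.mk al).keys) (fun k => k) false with hks
  have hksperm : ks.Perm (al.map (·.1)) := PySem.List.sorted_perm _ _ _
  have hksnodup : ks.Nodup := hksperm.nodup_iff.mpr h1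
  have hkslt : ks.Pairwise (· < ·) := by
    have hle : ks.Pairwise (· ≤ ·) := PySem.List.sorted_pairwise _ _
    exact (hle.and hksnodup).imp (fun h => lt_of_le_of_ne h.1 h.2)
  set g : String → List (String × String × String) := fun a =>
    (PySem.List.sorted2 ((PySem.Dict.mk al).getD a []) (fun p => p.1) (fun p => p.2) false).map
      (fun rt => (a, rt.1, rt.2)) with hg
  set triples := al.flatMap (fun p => p.2.map (fun q => (p.1, q.1, q.2))) with htr
  -- the per-key blocks, concatenated in sorted key order, are a permutation of all triples
  have hperm : (ks.flatMap g).Perm triples := by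
    have s1 : (ks.flatMap g).Perm ((al.map (·.1)).flatMap g) := List.Perm.flatMap_right g hksperm
    have s3 : ((al.map (·.1)).flatMap g).Perm triples := by
      rw [List.flatMap_map]
      apply List.Perm.flatMap_left
      intro p hp
      simp only [hg, hget p hp]
      exact (PySem.List.sorted2_perm _ _ _ _).map _
    exact s1.trans s3
  -- and strictly increasing under the (artifact, rel) lexicographic key
  have hpair : (ks.flatMap g).Pairwise
      (fun x y : String × String × String => toLex (x.1, x.2.1) < toLex (y.1, y.2.1)) := by
    apply pv_pairwise_flatMap
    · intro a ha
      rw [hg, List.pairwise_map]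
      have hmem : ∃ p ∈ al, p.1 = a := by
        have : a ∈ al.map (·.1) := hksperm.mem_iff.mp ha
        simpa using this
      rcases hmem with ⟨p, hp, rfl⟩
      have hfst : ((PySem.List.sorted2 ((PySem.Dict.mk al).getD p.1 [])
          (fun q => q.1) (fun q => q.2) false).map (fun q : String × String => q.1)).Nodup := by
        have hp2 := (PySem.List.sorted2_perm ((PySem.Dict.mk al).getD p.1 [])
          (fun q => q.1) (fun q => q.2) false).map (fun q : String × String => q.1)
        refine hp2.nodup_iff.mpr ?_
        rw [hget p hp]; exact h2 p hp
      have hle : (PySem.List.sorted2 ((PySem.Dict.mk al).getD p.1 [])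
          (fun q => q.1) (fun q => q.2) false).Pairwise
          (fun x y => toLex (x.1, x.2) ≤ toLex (y.1, y.2)) := by
        rw [pv_sorted2_eq_sorted_lex]
        exact PySem.List.sorted_pairwise _ _
      have hne : (PySem.List.sorted2 ((PySem.Dict.mk al).getD p.1 [])
          (fun q => q.1) (fun q => q.2) false).Pairwise (fun x y => x.1 ≠ y.1) := by
        rw [← List.pairwise_map (f := fun q : String × String => q.1) (R := (· ≠ ·))]
        exact hfst
      refine (hle.and hne).imp ?_
      intro x y hxy
      have hlt : x.1 < y.1 := by
        rcases Prod.Lex.toLex_le_toLex.mp hxy.1 with h | h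
        · exact h
        · exact absurd h.1 hxy.2
      exact Prod.Lex.toLex_lt_toLex.mpr (Or.inr ⟨rfl, hlt⟩)
    · refine hkslt.imp ?_
      intro a b hab u hu v hv
      rcases List.mem_map.mp hu with ⟨ru, _, rfl⟩
      rcases List.mem_map.mp hv with ⟨rv, _, rfl⟩
      exact Prod.Lex.toLex_lt_toLex.mpr (Or.inl hab)
  -- hence B's single sort returns exactly A's concatenation order
  have hsort : PySem.List.sorted triples
      (fun tr : String × String × String => toLex (tr.1, toLex tr.2)) false
      = ks.flatMap g := by
    refine PySem.List.sorted_eq_of_perm_of_pairwise_lt _ _ _ hperm (hpair.imp ?_)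
    intro x y hxy
    rcases Prod.Lex.toLex_lt_toLex.mp hxy with h | h
    · exact Prod.Lex.toLex_lt_toLex.mpr (Or.inl h)
    · exact Prod.Lex.toLex_lt_toLex.mpr
        (Or.inr ⟨h.1, Prod.Lex.toLex_lt_toLex.mpr (Or.inl h.2)⟩)
  -- assemble both sides
  simp only [generate_init_artifact_locations, generate_init_artifact_locations_alt,
    PySem.List.foldl_append_singleton_eq_map, PySem.List.foldl_append_eq_flatMap,
    List.nil_append, List.cons_append]
  rw [← hks, ← htr, hsort, List.map_flatMap]
  simp only [hg, List.map_map, Function.comp_def]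

-- ===== VERDICT (by name: the statement is the Claim_ definition above) =====
theorem generate_init_artifact_locations_spec : Claim_equal_generate_init_artifact_locations := by
  intro al _ hpre
  exact pv_main al hpre.1 hpre.2
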